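-- pv_equiv track=rewrite | github.com/Shirohi-git/AtCoder | agc/agc044_a.py | solve
-- ===== SOURCE A (Python) =====
-- def solve(LIST):
--     n, *times, d = LIST
--     cnt, stack = {n: 0, 0: n * d}, [n]
--
--     while stack:
--         q = stack.pop()
--         if q <= 1:
--             continue
--         lst = []
--         for num, cost in zip([2, 3, 5], times):
--             mod, nxt = q % num, q // num
--             lst.append((mod, nxt, cost))
--             mod, nxt = (num - mod) % num, (q + num - 1) // num
--             lst.append((mod, nxt, cost))
--
--         cnt[0] = min(cnt[0], q * d + cnt[q])
--         for mod, nxt, cost in lst: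
--             nxt_cost = mod * d + cost + cnt[q]
--             if (nxt not in cnt) or (nxt_cost < cnt[nxt]):
--                 cnt[nxt] = nxt_cost
--                 stack.append(nxt)
--     return min(cnt[1] + d, cnt[0])
-- ===== SOURCE B (Python) =====
-- def solve(LIST):
--     n, *times, d = LIST
--     ps = list(zip([2, 3, 5], times))
--     memo = {}
--
--     def g(x):
--         # min cost to bring x down to 0 (subtracting 1 costs d; dividing by p costs ps[p])
--         if x <= 1:
--             return x * d
--         if x in memo:
--             return memo[x]
--         best = x * d
--         for p, c in ps:
--             m = x % p
--             best = min(best, m * d + c + g(x // p))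
--             best = min(best, ((p - m) % p) * d + c + g((x + p - 1) // p))
--         memo[x] = best
--         return best
--
--     return g(n)
-- ===== Notes on version B (the rewrite author's own statement) =====
-- stated objective: simpler
-- what changed: Replaces the stack-based SPFA relaxation over an explicit dict of tentative costs by a direct top-down memoized recursion g(x) = min cost to bring x to 0 (base x*d, plus floor/ceil division branches), returning g(n).
import Mathlib
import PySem

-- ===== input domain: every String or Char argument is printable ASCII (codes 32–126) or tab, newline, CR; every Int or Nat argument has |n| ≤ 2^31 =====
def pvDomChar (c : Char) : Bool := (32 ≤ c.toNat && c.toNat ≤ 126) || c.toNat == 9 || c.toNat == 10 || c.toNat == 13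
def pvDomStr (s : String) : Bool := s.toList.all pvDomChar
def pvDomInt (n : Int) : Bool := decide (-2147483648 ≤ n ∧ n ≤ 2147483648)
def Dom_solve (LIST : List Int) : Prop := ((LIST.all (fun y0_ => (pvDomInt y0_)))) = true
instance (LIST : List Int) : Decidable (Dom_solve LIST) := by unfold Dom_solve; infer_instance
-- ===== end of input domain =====

-- B replaces A's stack-based SPFA relaxation over an explicit dict of tentative costs by a
-- direct memoized recursion g(x) = min cost to bring x to 0; equal return values on Pre_.

-- ===== PORT A =====
-- A pops from the END of its Python stack list and appends at the end; the port keeps the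
-- stack top-at-head (pop = head, append = cons), which is the same stack discipline.

-- helper for A's inner `for num, cost in zip([2,3,5], times)` loop building `lst`
def pvEdgesZ (q : Int) (l : List (Int × Int)) : List (Int × Int × Int) :=
  l.flatMap (fun pc =>
    [(PySem.Int.mod q pc.1, PySem.Int.floordiv q pc.1, pc.2),
     (PySem.Int.mod (pc.1 - PySem.Int.mod q pc.1) pc.1, PySem.Int.floordiv (q + pc.1 - 1) pc.1, pc.2)])

-- termination measure: sum of 7^q over the stack
def pvMu (stack : List Int) : Nat := (stack.map (fun q => 7 ^ q.toNat)).sum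

-- A's inner relaxation loop `for mod, nxt, cost in lst: ...` (cnt[q] reread each step, as in A)
def pvRelaxStep (d q : Int) (cs : PySem.Dict Int Int × List Int) (e : Int × Int × Int) :
    PySem.Dict Int Int × List Int :=
  let nc := e.1 * d + e.2.2 + cs.1.getD q 0
  match cs.1.get? e.2.1 with
  | none => (cs.1.insert e.2.1 nc, e.2.1 :: cs.2)
  | some old => if nc < old then (cs.1.insert e.2.1 nc, e.2.1 :: cs.2) else cs

def pvRelax (d q : Int) (lst : List (Int × Int × Int)) (cs : PySem.Dict Int Int × List Int) :
    PySem.Dict Int Int × List Int :=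
  lst.foldl (pvRelaxStep d q) cs

lemma pv_div_shrink (x p : Int) (hx : 2 ≤ x) (hp : 2 ≤ p) :
    0 ≤ PySem.Int.floordiv x p ∧ PySem.Int.floordiv x p < x ∧
    1 ≤ PySem.Int.floordiv (x + p - 1) p ∧ PySem.Int.floordiv (x + p - 1) p < x := by
  have hp0 : (0:Int) < p := by omega
  refine ⟨?_, ?_, ?_, ?_⟩
  · have := (PySem.Int.le_floordiv_iff_mul_le (a := x) (b := p) (q := 0) hp0).2 (by omega)
    omega
  · exact (PySem.Int.floordiv_lt_iff_lt_mul (a := x) (b := p) (q := x) hp0).2 (by nlinarith)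
  · exact (PySem.Int.le_floordiv_iff_mul_le (a := x + p - 1) (b := p) (q := 1) hp0).2 (by omega)
  · exact (PySem.Int.floordiv_lt_iff_lt_mul (a := x + p - 1) (b := p) (q := x) hp0).2 (by nlinarith)

lemma pvMu_cons (x : Int) (s : List Int) : pvMu (x :: s) = 7 ^ x.toNat + pvMu s := by
  simp [pvMu]

lemma pv_edges_mem (q : Int) (l : List (Int × Int)) (hq : 2 ≤ q)
    (hl : ∀ pc ∈ l, 2 ≤ pc.1) :
    ∀ e ∈ pvEdgesZ q l, 0 ≤ e.2.1 ∧ e.2.1 < q := by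
  intro e he
  simp only [pvEdgesZ, List.mem_flatMap] at he
  obtain ⟨pc, hpc, he⟩ := he
  have hp := hl pc hpc
  have hs := pv_div_shrink q pc.1 hq hp
  simp only [List.mem_cons] at he
  rcases he with rfl | rfl | h
  · exact ⟨hs.1, hs.2.1⟩
  · exact ⟨by simp; omega, by simp; exact hs.2.2.2⟩
  · exact absurd h (List.not_mem_nil)

lemma pv_mu_relax (d q : Int) (B : Nat) :
    ∀ (lst : List (Int × Int × Int)) (cs : PySem.Dict Int Int × List Int),
      (∀ e ∈ lst, 7 ^ e.2.1.toNat ≤ B) →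
      pvMu (pvRelax d q lst cs).2 ≤ pvMu cs.2 + lst.length * B := by
  intro lst
  induction lst with
  | nil => intro cs _; simp [pvRelax]
  | cons e lst ih =>
    intro cs hb
    have he := hb e (by simp)
    have htail : ∀ e' ∈ lst, 7 ^ e'.2.1.toNat ≤ B := fun e' h => hb e' (by simp [h])
    simp only [pvRelax, List.foldl_cons]
    have step : pvMu (pvRelaxStep d q cs e).2 ≤ pvMu cs.2 + 7 ^ e.2.1.toNat := by
      unfold pvRelaxStep
      rcases hg : cs.1.get? e.2.1 with _ | old <;> dsimp only
      · simp only [pvMu_cons]; omega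
      · split
        · simp only [pvMu_cons]; omega
        · exact Nat.le_add_right _ _
    have h2 := ih (pvRelaxStep d q cs e) htail
    unfold pvRelax at h2
    have hle : (e :: lst).length * B = lst.length * B + B := by
      simp [List.length_cons, Nat.succ_mul]
    omega

lemma pv_edges_len (q : Int) (l : List (Int × Int)) : (pvEdgesZ q l).length = 2 * l.length := by
  induction l with
  | nil => simp [pvEdgesZ]
  | cons pc l ih =>
    simp only [pvEdgesZ, List.flatMap_cons, List.length_append, List.length_cons] at *
    simp [ih]; omega

lemma pv_zip_fst (times : List Int) : ∀ pc ∈ ([(2:Int),3,5].zip times), 2 ≤ pc.1 := by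
  intro pc hpc
  have := (List.of_mem_zip hpc).1
  rcases pc with ⟨p, c⟩
  simp at this
  rcases this with rfl | rfl | rfl <;> norm_num

lemma pv_mu_step (times : List Int) (d q : Int) (cnt1 : PySem.Dict Int Int) (rest : List Int)
    (hq : ¬ q ≤ 1) :
    pvMu (pvRelax d q (pvEdgesZ q ([(2:Int),3,5].zip times)) (cnt1, rest)).2 < pvMu (q :: rest) := by
  have hq2 : 2 ≤ q := by omega
  have hmem := pv_edges_mem q _ hq2 (pv_zip_fst times)
  have hlen : (pvEdgesZ q ([(2:Int),3,5].zip times)).length ≤ 6 := by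
    rw [pv_edges_len]
    have : ([(2:Int),3,5].zip times).length ≤ 3 := by simp [List.length_zip]
    omega
  obtain ⟨m, hm⟩ : ∃ m, q.toNat = m + 1 := ⟨q.toNat - 1, by omega⟩
  have hb : ∀ e ∈ pvEdgesZ q ([(2:Int),3,5].zip times), 7 ^ e.2.1.toNat ≤ 7 ^ m := by
    intro e he
    have := hmem e he
    exact Nat.pow_le_pow_right (by norm_num) (by omega)
  have h1 := pv_mu_relax d q (7 ^ m) _ (cnt1, rest) hb
  have h6 : (pvEdgesZ q ([(2:Int),3,5].zip times)).length * 7 ^ m ≤ 6 * 7 ^ m :=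
    Nat.mul_le_mul_right _ hlen
  have hQ : 7 ^ q.toNat = 7 * 7 ^ m := by rw [hm, pow_succ]; ring
  have hpos : 0 < 7 ^ m := Nat.pow_pos (by norm_num)
  rw [pvMu_cons, hQ]
  simp only [] at h1
  generalize hgen : (7:Nat) ^ m = P at *
  omega

def pvLoop (times : List Int) (d : Int) (cnt : PySem.Dict Int Int) (stack : List Int) : Int :=
  match stack with
  | [] => min (cnt.getD 1 0 + d) (cnt.getD 0 0)
  | q :: rest =>
    if h : q ≤ 1 then pvLoop times d cnt rest
    else
      let cnt1 := cnt.insert 0 (min (cnt.getD 0 0) (q * d + cnt.getD q 0))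
      let cs := pvRelax d q (pvEdgesZ q ([2,3,5].zip times)) (cnt1, rest)
      pvLoop times d cs.1 cs.2
termination_by pvMu stack
decreasing_by
  · rw [pvMu_cons]
    have : 0 < 7 ^ q.toNat := Nat.pow_pos (by norm_num)
    omega
  · exact pv_mu_step times d q _ rest h

def solve (LIST : List Int) : Int :=
  let n := LIST.headD 0
  let d := LIST.getLastD 0
  let times := (LIST.drop 1).dropLast
  let cnt := ((PySem.Dict.empty).insert n 0).insert 0 (n * d)
  pvLoop times d cnt [n]

-- ===== PORT B =====
-- memoized recursion g(x) = min cost to reduce x to 0, memo threaded through; fuel = n.toNat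
-- (a pure totality guard: fuel never runs out when started at n.toNat, see gm lemmas below)
def pvGM (ps : List (Int × Int)) (d : Int) :
    Nat → PySem.Dict Int Int → Int → PySem.Dict Int Int × Int
  | fuel, memo, x =>
    if x ≤ 1 then (memo, x * d)
    else
      match memo.get? x with
      | some v => (memo, v)
      | none =>
        match fuel with
        | 0 => (memo, x * d)
        | fuel + 1 =>
          let r := ps.foldl (fun (acc : PySem.Dict Int Int × Int) pc =>
            let m := PySem.Int.mod x pc.1
            let r1 := pvGM ps d fuel acc.1 (PySem.Int.floordiv x pc.1)
            let best := min acc.2 (m * d + pc.2 + r1.2)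
            let r2 := pvGM ps d fuel r1.1 (PySem.Int.floordiv (x + pc.1 - 1) pc.1)
            (r2.1, min best (PySem.Int.mod (pc.1 - m) pc.1 * d + pc.2 + r2.2))) (memo, x * d)
          (r.1.insert x r.2, r.2)

def solve_alt (LIST : List Int) : Int :=
  let n := LIST.headD 0
  let d := LIST.getLastD 0
  let times := (LIST.drop 1).dropLast
  (pvGM ([2,3,5].zip times) d n.toNat PySem.Dict.empty n).2

-- ===== PRECONDITION & SPEC =====
-- Pre_ excludes exactly the inputs on which A raises: lists of length < 2 (unpacking fails),
-- a first element n ≤ 0, and n ≥ 2 with no division costs at all (then cnt[1] raises KeyError).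
def Pre_solve (LIST : List Int) : Prop :=
  2 ≤ LIST.length ∧ 1 ≤ LIST.headD 0 ∧ (LIST.headD 0 = 1 ∨ 3 ≤ LIST.length)
instance (LIST : List Int) : Decidable (Pre_solve LIST) := by unfold Pre_solve; infer_instance
def pvWitness_solve : List Int := [10, 1, 2, 3, 7]

def Spec_solve (LIST : List Int) (out : Int) : Prop := out = solve_alt LIST
instance (LIST : List Int) (out : Int) : Decidable (Spec_solve LIST out) := by unfold Spec_solve; infer_instance

-- ===== CLAIM (what is proved, stated in full; the proofs are below) =====
def Claim_equal_solve : Prop := ∀ (LIST : List Int), Dom_solve LIST → Pre_solve LIST → Spec_solve LIST (solve LIST)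

-- ===== LEMMAS AND PROOFS =====

-- min over a list of candidates with an initial candidate
def pvMinOf (a : Int) (l : List Int) : Int := l.foldl min a

lemma pvMinOf_cons (a b : Int) (l : List Int) : pvMinOf a (b :: l) = pvMinOf (min a b) l := rfl

lemma pvMinOf_le_base (a : Int) (l : List Int) : pvMinOf a l ≤ a := by
  induction l generalizing a with
  | nil => exact le_refl a
  | cons b l ih => exact le_trans (ih (min a b)) (min_le_left a b)

lemma pvMinOf_le_mem (a t : Int) (l : List Int) (h : t ∈ l) : pvMinOf a l ≤ t := by
  induction l generalizing a with
  | nil => cases h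
  | cons b l ih =>
    rcases List.mem_cons.1 h with rfl | h
    · rw [pvMinOf_cons]; exact le_trans (pvMinOf_le_base _ _) (min_le_right a t)
    · exact ih (min a b) h

lemma pvMinOf_cases (a : Int) (l : List Int) : pvMinOf a l = a ∨ pvMinOf a l ∈ l := by
  induction l generalizing a with
  | nil => exact Or.inl rfl
  | cons b l ih =>
    rcases ih (min a b) with h | h
    · rcases min_cases a b with ⟨h', _⟩ | ⟨h', _⟩
      · rw [pvMinOf_cons, h, h']; exact Or.inl rfl
      · rw [pvMinOf_cons, h, h']; exact Or.inr (List.mem_cons_self)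
    · exact Or.inr (List.mem_cons_of_mem _ h)

lemma le_pvMinOf (c a : Int) (l : List Int) (ha : c ≤ a) (hl : ∀ t ∈ l, c ≤ t) :
    c ≤ pvMinOf a l := by
  induction l generalizing a with
  | nil => exact ha
  | cons b l ih =>
    exact ih (min a b) (le_min ha (hl b (by simp))) (fun t ht => hl t (by simp [ht]))

-- pure (memo-free) version of B's recursion, with the same fuel discipline
def pvG (ps : List (Int × Int)) (d : Int) : Nat → Int → Int
  | fuel, x =>
    if x ≤ 1 then x * d
    else match fuel with
      | 0 => x * d
      | fuel + 1 =>
        ps.foldl (fun best pc =>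
          let m := PySem.Int.mod x pc.1
          min (min best (m * d + pc.2 + pvG ps d fuel (PySem.Int.floordiv x pc.1)))
              (PySem.Int.mod (pc.1 - m) pc.1 * d + pc.2 +
                pvG ps d fuel (PySem.Int.floordiv (x + pc.1 - 1) pc.1))) (x * d)

def pvGx (ps : List (Int × Int)) (d x : Int) : Int := pvG ps d x.toNat x

def pvGG (times : List Int) (d x : Int) : Int := pvGx ([2,3,5].zip times) d x

lemma pvG_low (ps : List (Int × Int)) (d : Int) (fuel : Nat) (x : Int) (hx : x ≤ 1) :
    pvG ps d fuel x = x * d := by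
  cases fuel <;> simp [pvG, hx]

lemma pvGx_low (ps : List (Int × Int)) (d x : Int) (hx : x ≤ 1) : pvGx ps d x = x * d :=
  pvG_low ps d _ x hx

lemma pv_shrink_toNat (x p : Int) (hx : 2 ≤ x) (hp : 2 ≤ p) :
    (PySem.Int.floordiv x p).toNat < x.toNat ∧
    (PySem.Int.floordiv (x + p - 1) p).toNat < x.toNat := by
  have h := pv_div_shrink x p hx hp
  omega

lemma pvG_fuel (ps : List (Int × Int)) (d : Int) (hp : ∀ pc ∈ ps, 2 ≤ pc.1) :
    ∀ (f : Nat) (x : Int), x.toNat ≤ f → pvG ps d f x = pvGx ps d x := by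
  intro f
  induction f using Nat.strong_induction_on with
  | _ f ih =>
    intro x hxf
    by_cases hx : x ≤ 1
    · rw [pvG_low ps d f x hx, pvGx_low ps d x hx]
    · have hx2 : 2 ≤ x := by omega
      have hm : ∃ m, x.toNat = m + 1 := ⟨x.toNat - 1, by omega⟩
      obtain ⟨m, hm⟩ := hm
      obtain ⟨f', rfl⟩ : ∃ f', f = f' + 1 := ⟨f - 1, by omega⟩
      show pvG ps d (f' + 1) x = pvG ps d x.toNat x
      rw [hm]
      show (if x ≤ 1 then x * d else _) = (if x ≤ 1 then x * d else _)
      simp only [if_neg hx]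
      apply List.foldl_ext
      intro best pc hpc
      have hpc2 := hp pc hpc
      have hs := pv_shrink_toNat x pc.1 hx2 hpc2
      have h1 : pvG ps d f' (PySem.Int.floordiv x pc.1) = pvGx ps d (PySem.Int.floordiv x pc.1) :=
        ih f' (by omega) _ (by omega)
      have h2 : pvG ps d m (PySem.Int.floordiv x pc.1) = pvGx ps d (PySem.Int.floordiv x pc.1) :=
        ih m (by omega) _ (by omega)
      have h3 : pvG ps d f' (PySem.Int.floordiv (x + pc.1 - 1) pc.1)
          = pvGx ps d (PySem.Int.floordiv (x + pc.1 - 1) pc.1) := ih f' (by omega) _ (by omega)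
      have h4 : pvG ps d m (PySem.Int.floordiv (x + pc.1 - 1) pc.1)
          = pvGx ps d (PySem.Int.floordiv (x + pc.1 - 1) pc.1) := ih m (by omega) _ (by omega)
      simp only [h1, h2, h3, h4]

lemma pv_foldG_aux (ps : List (Int × Int)) (d x : Int) (f : Nat)
    (hp : ∀ pc ∈ ps, 2 ≤ pc.1) (hx : 2 ≤ x) (hf : x.toNat ≤ f + 1) :
    ∀ (l : List (Int × Int)) (a : Int), (∀ pc ∈ l, 2 ≤ pc.1) →
      l.foldl (fun best pc =>
        let m := PySem.Int.mod x pc.1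
        min (min best (m * d + pc.2 + pvG ps d f (PySem.Int.floordiv x pc.1)))
            (PySem.Int.mod (pc.1 - m) pc.1 * d + pc.2 +
              pvG ps d f (PySem.Int.floordiv (x + pc.1 - 1) pc.1))) a
      = pvMinOf a ((pvEdgesZ x l).map (fun e => e.1 * d + e.2.2 + pvGx ps d e.2.1)) := by
  intro l
  induction l with
  | nil => intro a _; simp [pvEdgesZ, pvMinOf]
  | cons pc l ihl =>
    intro a hl
    have hpc : 2 ≤ pc.1 := hl pc (by simp)
    have hs := pv_shrink_toNat x pc.1 hx hpc
    have h1 : pvG ps d f (PySem.Int.floordiv x pc.1) = pvGx ps d (PySem.Int.floordiv x pc.1) :=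
      pvG_fuel ps d hp f _ (by omega)
    have h2 : pvG ps d f (PySem.Int.floordiv (x + pc.1 - 1) pc.1)
        = pvGx ps d (PySem.Int.floordiv (x + pc.1 - 1) pc.1) :=
      pvG_fuel ps d hp f _ (by omega)
    have hrest := ihl (min (min a (PySem.Int.mod x pc.1 * d + pc.2 +
        pvG ps d f (PySem.Int.floordiv x pc.1)))
        (PySem.Int.mod (pc.1 - PySem.Int.mod x pc.1) pc.1 * d + pc.2 +
          pvG ps d f (PySem.Int.floordiv (x + pc.1 - 1) pc.1)))
        (fun pc' h => hl pc' (by simp [h]))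
    simp only [List.foldl_cons]
    rw [hrest]
    simp only [pvEdgesZ, List.flatMap_cons, List.map_append, List.map_cons, List.map_nil]
    rw [show ∀ (u v : Int) (m : List Int), pvMinOf a ([u, v] ++ m) = pvMinOf (min (min a u) v) m
      from fun u v m => rfl]
    rw [h1, h2]

-- unfolding pvGx at x ≥ 2 as a min over the edge list A builds
lemma pvGx_edges (ps : List (Int × Int)) (d x : Int) (hp : ∀ pc ∈ ps, 2 ≤ pc.1) (hx : 2 ≤ x) :
    pvGx ps d x = pvMinOf (x * d)
      ((pvEdgesZ x ps).map (fun e => e.1 * d + e.2.2 + pvGx ps d e.2.1)) := by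
  obtain ⟨m, hm⟩ : ∃ m, x.toNat = m + 1 := ⟨x.toNat - 1, by omega⟩
  show pvG ps d x.toNat x = _
  rw [hm]
  show (if x ≤ 1 then x * d else _) = _
  rw [if_neg (by omega)]
  exact pv_foldG_aux ps d x m hp hx (by omega) ps (x * d) hp

lemma pvGx_le_base (ps : List (Int × Int)) (d x : Int) (hp : ∀ pc ∈ ps, 2 ≤ pc.1) :
    pvGx ps d x ≤ x * d := by
  by_cases hx : x ≤ 1
  · rw [pvGx_low ps d x hx]
  · rw [pvGx_edges ps d x hp (by omega)]; exact pvMinOf_le_base _ _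

lemma pvGM_fold_aux (ps : List (Int × Int)) (d x : Int) (fuel : Nat)
    (hp : ∀ pc ∈ ps, 2 ≤ pc.1) (hx : 2 ≤ x) (hfx : x.toNat ≤ fuel + 1)
    (ihrec : ∀ (y : Int) (memo' : PySem.Dict Int Int), y.toNat ≤ fuel →
      (∀ k v, memo'.get? k = some v → v = pvGx ps d k) →
      (pvGM ps d fuel memo' y).2 = pvGx ps d y ∧
      (∀ k v, (pvGM ps d fuel memo' y).1.get? k = some v → v = pvGx ps d k)) :
    ∀ (l : List (Int × Int)), (∀ pc ∈ l, 2 ≤ pc.1) →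
      ∀ (memo : PySem.Dict Int Int) (best : Int),
      (∀ k v, memo.get? k = some v → v = pvGx ps d k) →
      (l.foldl (fun (acc : PySem.Dict Int Int × Int) pc =>
          let m := PySem.Int.mod x pc.1
          let r1 := pvGM ps d fuel acc.1 (PySem.Int.floordiv x pc.1)
          let best := min acc.2 (m * d + pc.2 + r1.2)
          let r2 := pvGM ps d fuel r1.1 (PySem.Int.floordiv (x + pc.1 - 1) pc.1)
          (r2.1, min best (PySem.Int.mod (pc.1 - m) pc.1 * d + pc.2 + r2.2))) (memo, best)).2
        = l.foldl (fun best pc =>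
          let m := PySem.Int.mod x pc.1
          min (min best (m * d + pc.2 + pvG ps d fuel (PySem.Int.floordiv x pc.1)))
              (PySem.Int.mod (pc.1 - m) pc.1 * d + pc.2 +
                pvG ps d fuel (PySem.Int.floordiv (x + pc.1 - 1) pc.1))) best ∧
      (∀ k v, (l.foldl (fun (acc : PySem.Dict Int Int × Int) pc =>
          let m := PySem.Int.mod x pc.1
          let r1 := pvGM ps d fuel acc.1 (PySem.Int.floordiv x pc.1)
          let best := min acc.2 (m * d + pc.2 + r1.2)
          let r2 := pvGM ps d fuel r1.1 (PySem.Int.floordiv (x + pc.1 - 1) pc.1)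
          (r2.1, min best (PySem.Int.mod (pc.1 - m) pc.1 * d + pc.2 + r2.2))) (memo, best)).1.get? k
        = some v → v = pvGx ps d k) := by
  intro l
  induction l with
  | nil => intro _ memo best hm; exact ⟨rfl, hm⟩
  | cons pc l ihl =>
    intro hl memo best hm
    have hpc : 2 ≤ pc.1 := hl pc (by simp)
    have hs := pv_shrink_toNat x pc.1 hx hpc
    have hr1 := ihrec (PySem.Int.floordiv x pc.1) memo (by omega) hm
    have hr2 := ihrec (PySem.Int.floordiv (x + pc.1 - 1) pc.1)
      (pvGM ps d fuel memo (PySem.Int.floordiv x pc.1)).1 (by omega) hr1.2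
    have hg1 : pvG ps d fuel (PySem.Int.floordiv x pc.1) = pvGx ps d (PySem.Int.floordiv x pc.1) :=
      pvG_fuel ps d hp fuel _ (by omega)
    have hg2 : pvG ps d fuel (PySem.Int.floordiv (x + pc.1 - 1) pc.1)
        = pvGx ps d (PySem.Int.floordiv (x + pc.1 - 1) pc.1) :=
      pvG_fuel ps d hp fuel _ (by omega)
    have hnext := ihl (fun pc' h => hl pc' (by simp [h]))
      ((pvGM ps d fuel (pvGM ps d fuel memo (PySem.Int.floordiv x pc.1)).1
        (PySem.Int.floordiv (x + pc.1 - 1) pc.1)).1)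
      (min (min best (PySem.Int.mod x pc.1 * d + pc.2 +
          (pvGM ps d fuel memo (PySem.Int.floordiv x pc.1)).2))
        (PySem.Int.mod (pc.1 - PySem.Int.mod x pc.1) pc.1 * d + pc.2 +
          (pvGM ps d fuel (pvGM ps d fuel memo (PySem.Int.floordiv x pc.1)).1
            (PySem.Int.floordiv (x + pc.1 - 1) pc.1)).2))
      hr2.2
    simp only [List.foldl_cons]
    rw [hnext.1]
    refine ⟨?_, hnext.2⟩
    rw [hr1.1, hr2.1, hg1, hg2]

-- the memoized port computes pvGx and keeps only correct memo entries
lemma pvGM_correct (ps : List (Int × Int)) (d : Int) (hp : ∀ pc ∈ ps, 2 ≤ pc.1) :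
    ∀ (fuel : Nat) (x : Int) (memo : PySem.Dict Int Int),
      x.toNat ≤ fuel →
      (∀ k v, memo.get? k = some v → v = pvGx ps d k) →
      (pvGM ps d fuel memo x).2 = pvGx ps d x ∧
      (∀ k v, (pvGM ps d fuel memo x).1.get? k = some v → v = pvGx ps d k) := by
  intro fuel
  induction fuel with
  | zero =>
    intro x memo hxf hm
    have hx : x ≤ 1 := by omega
    rw [pvGM.eq_def]; dsimp only; rw [if_pos hx]
    exact ⟨(pvGx_low ps d x hx).symm, hm⟩
  | succ fuel ih =>
    intro x memo hxf hm
    by_cases hx : x ≤ 1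
    · rw [pvGM.eq_def]; dsimp only; rw [if_pos hx]
      exact ⟨(pvGx_low ps d x hx).symm, hm⟩
    · have hx2 : 2 ≤ x := by omega
      rw [pvGM.eq_def]; dsimp only; rw [if_neg hx]
      rcases hg : memo.get? x with _ | v <;> dsimp only
      · have haux := pvGM_fold_aux ps d x fuel hp hx2 (by omega) (fun y m hy hmo => ih y m hy hmo)
          ps hp memo (x * d) hm
        have hpure : ps.foldl (fun best pc =>
            let m := PySem.Int.mod x pc.1
            min (min best (m * d + pc.2 + pvG ps d fuel (PySem.Int.floordiv x pc.1)))
                (PySem.Int.mod (pc.1 - m) pc.1 * d + pc.2 +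
                  pvG ps d fuel (PySem.Int.floordiv (x + pc.1 - 1) pc.1))) (x * d)
            = pvGx ps d x := by
          have : pvG ps d (fuel + 1) x = pvGx ps d x := pvG_fuel ps d hp (fuel + 1) x hxf
          rw [← this]
          show _ = (if x ≤ 1 then x * d else _)
          rw [if_neg hx]
        constructor
        · show (_, _).2 = _
          simp only []
          rw [haux.1, hpure]
        · intro k v hk
          rw [PySem.Dict.get?_insert] at hk
          split at hk
          · rename_i hkx
            subst hkx
            cases hk
            rw [haux.1, hpure]
          · exact haux.2 k v hk
      · exact ⟨hm x v hg, hm⟩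

lemma pvGG_low (times : List Int) (d x : Int) (hx : x ≤ 1) : pvGG times d x = x * d :=
  pvGx_low _ d x hx

lemma pvGG_le_base (times : List Int) (d x : Int) : pvGG times d x ≤ x * d :=
  pvGx_le_base _ d x (pv_zip_fst times)

lemma pvGG_edges (times : List Int) (d x : Int) (hx : 2 ≤ x) :
    pvGG times d x = pvMinOf (x * d)
      ((pvEdgesZ x ([2,3,5].zip times)).map (fun e => e.1 * d + e.2.2 + pvGG times d e.2.1)) :=
  pvGx_edges _ d x (pv_zip_fst times) hx

-- ==== A-side: value of a loop state ====

def pvVal (times : List Int) (d : Int) (cnt : PySem.Dict Int Int) (stack : List Int) : Int :=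
  pvMinOf (cnt.getD 0 0)
    ((if cnt.contains 1 then [cnt.getD 1 0 + d] else []) ++
      stack.map (fun s => cnt.getD s 0 + pvGG times d s))

-- a processed state: its to-0 option and all its out-edges are already recorded in cnt
def pvSettled (times : List Int) (d : Int) (cnt : PySem.Dict Int Int) (k : Int) : Prop :=
  cnt.getD 0 0 ≤ k * d + cnt.getD k 0 ∧
  ∀ e ∈ pvEdgesZ k ([2,3,5].zip times),
    cnt.contains e.2.1 = true ∧ cnt.getD e.2.1 0 ≤ e.1 * d + e.2.2 + cnt.getD k 0

def pvInv (times : List Int) (d : Int) (cnt : PySem.Dict Int Int) (stack : List Int) : Prop :=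
  cnt.contains 0 = true ∧
  (∀ s ∈ stack, 0 ≤ s ∧ cnt.contains s = true) ∧
  (∀ k, cnt.contains k = true → 2 ≤ k → k ∉ stack → pvSettled times d cnt k) ∧
  (cnt.contains 1 = true ∨ (times ≠ [] ∧ ∃ k, cnt.contains k = true ∧ 2 ≤ k))

-- every recorded state's cost-so-far plus optimal rest bounds the state value from below
lemma pv_term_ge (times : List Int) (d : Int) (cnt : PySem.Dict Int Int) (stack : List Int)
    (h3 : ∀ k, cnt.contains k = true → 2 ≤ k → k ∉ stack → pvSettled times d cnt k) :
    ∀ k, 0 ≤ k → cnt.contains k = true →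
      pvVal times d cnt stack ≤ cnt.getD k 0 + pvGG times d k := by
  suffices H : ∀ (n : Nat) (k : Int), k.toNat = n → 0 ≤ k → cnt.contains k = true →
      pvVal times d cnt stack ≤ cnt.getD k 0 + pvGG times d k by
    exact fun k hk0 hc => H k.toNat k rfl hk0 hc
  intro n
  induction n using Nat.strong_induction_on with
  | _ n ih =>
  intro k hkn hk0 hc
  subst hkn
  by_cases hk1 : k ≤ 1
  · have : k = 0 ∨ k = 1 := by omega
    rcases this with rfl | rfl
    · rw [pvGG_low times d 0 (by norm_num)]
      simpa using pvMinOf_le_base _ _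
    · rw [pvGG_low times d 1 (by norm_num)]
      have hmem : cnt.getD 1 0 + d ∈ (if cnt.contains 1 then [cnt.getD 1 0 + d] else []) ++
          stack.map (fun s => cnt.getD s 0 + pvGG times d s) := by
        rw [hc]; simp
      have := pvMinOf_le_mem (cnt.getD 0 0) _ _ hmem
      rw [show (1 : Int) * d = d by ring]
      exact this
  · have hk2 : 2 ≤ k := by omega
    by_cases hks : k ∈ stack
    · exact pvMinOf_le_mem _ _ _ (by
        apply List.mem_append_right
        exact List.mem_map.2 ⟨k, hks, rfl⟩)
    · have hset := h3 k hc hk2 hks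
      have hE := pvGG_edges times d k hk2
      rcases pvMinOf_cases (k * d)
          ((pvEdgesZ k ([2,3,5].zip times)).map
            (fun e => e.1 * d + e.2.2 + pvGG times d e.2.1)) with hcase | hcase <;>
        rw [← hE] at hcase
      · rw [hcase]
        have hbase := pvMinOf_le_base (cnt.getD 0 0)
          ((if cnt.contains 1 then [cnt.getD 1 0 + d] else []) ++
            stack.map (fun s => cnt.getD s 0 + pvGG times d s))
        have := hset.1
        unfold pvVal
        omega
      · obtain ⟨e, he, heq⟩ := List.mem_map.1 hcase
        have hedge := hset.2 e he
        have hbnd := pv_edges_mem k ([2,3,5].zip times) hk2 (pv_zip_fst times) e he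
        have hrec := ih (e.2.1).toNat (by omega) e.2.1 rfl (by omega) hedge.1
        omega

-- full characterisation of A's inner relaxation loop
lemma pv_relax_spec (d q : Int) :
    ∀ (lst : List (Int × Int × Int)) (cnt : PySem.Dict Int Int) (stack : List Int),
      (∀ e ∈ lst, e.2.1 ≠ q) →
      (∀ k, (pvRelax d q lst (cnt, stack)).1.get? k = cnt.get? k ∨
        (k ∈ (pvRelax d q lst (cnt, stack)).2 ∧ ∃ e ∈ lst, k = e.2.1 ∧
          (pvRelax d q lst (cnt, stack)).1.get? k = some (e.1 * d + e.2.2 + cnt.getD q 0))) ∧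
      (∀ k v w, cnt.get? k = some v → (pvRelax d q lst (cnt, stack)).1.get? k = some w → w ≤ v) ∧
      (∀ s ∈ (pvRelax d q lst (cnt, stack)).2, s ∈ stack ∨
        ((pvRelax d q lst (cnt, stack)).1.contains s = true ∧ ∃ e ∈ lst, s = e.2.1)) ∧
      (∀ s ∈ stack, s ∈ (pvRelax d q lst (cnt, stack)).2) ∧
      (∀ e ∈ lst, (pvRelax d q lst (cnt, stack)).1.contains e.2.1 = true ∧
        (pvRelax d q lst (cnt, stack)).1.getD e.2.1 0 ≤ e.1 * d + e.2.2 + cnt.getD q 0) ∧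
      (∀ k, cnt.contains k = true → (pvRelax d q lst (cnt, stack)).1.contains k = true) ∧
      (pvRelax d q lst (cnt, stack)).1.get? q = cnt.get? q := by
  intro lst
  induction lst with
  | nil =>
    intro cnt stack _
    exact ⟨fun k => Or.inl rfl,
      fun k v w h1 h2 => le_of_eq (Option.some.inj (h1.symm.trans h2)).symm,
      fun s hs => Or.inl hs, fun s hs => hs, fun e he => absurd he (List.not_mem_nil),
      fun k hk => hk, rfl⟩
  | cons e lst ih =>
    intro cnt stack hne
    have hneq : e.2.1 ≠ q := hne e (by simp)
    have hne' : ∀ e' ∈ lst, e'.2.1 ≠ q := fun e' h => hne e' (by simp [h])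
    have hunf : pvRelax d q (e :: lst) (cnt, stack)
        = pvRelax d q lst (pvRelaxStep d q (cnt, stack) e) := by
      simp [pvRelax]
    have key : (∀ v, cnt.get? e.2.1 = some v → e.1 * d + e.2.2 + cnt.getD q 0 ≤ v) →
        (∀ k, (pvRelax d q lst (cnt.insert e.2.1 (e.1 * d + e.2.2 + cnt.getD q 0), e.2.1 :: stack)).1.get? k = cnt.get? k ∨
          (k ∈ (pvRelax d q lst (cnt.insert e.2.1 (e.1 * d + e.2.2 + cnt.getD q 0), e.2.1 :: stack)).2 ∧ ∃ e' ∈ e :: lst, k = e'.2.1 ∧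
            (pvRelax d q lst (cnt.insert e.2.1 (e.1 * d + e.2.2 + cnt.getD q 0), e.2.1 :: stack)).1.get? k = some (e'.1 * d + e'.2.2 + cnt.getD q 0))) ∧
        (∀ k v w, cnt.get? k = some v → (pvRelax d q lst (cnt.insert e.2.1 (e.1 * d + e.2.2 + cnt.getD q 0), e.2.1 :: stack)).1.get? k = some w → w ≤ v) ∧
        (∀ s ∈ (pvRelax d q lst (cnt.insert e.2.1 (e.1 * d + e.2.2 + cnt.getD q 0), e.2.1 :: stack)).2, s ∈ stack ∨
          ((pvRelax d q lst (cnt.insert e.2.1 (e.1 * d + e.2.2 + cnt.getD q 0), e.2.1 :: stack)).1.contains s = true ∧ ∃ e' ∈ e :: lst, s = e'.2.1)) ∧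
        (∀ s ∈ stack, s ∈ (pvRelax d q lst (cnt.insert e.2.1 (e.1 * d + e.2.2 + cnt.getD q 0), e.2.1 :: stack)).2) ∧
        (∀ e' ∈ e :: lst, (pvRelax d q lst (cnt.insert e.2.1 (e.1 * d + e.2.2 + cnt.getD q 0), e.2.1 :: stack)).1.contains e'.2.1 = true ∧
          (pvRelax d q lst (cnt.insert e.2.1 (e.1 * d + e.2.2 + cnt.getD q 0), e.2.1 :: stack)).1.getD e'.2.1 0 ≤ e'.1 * d + e'.2.2 + cnt.getD q 0) ∧
        (∀ k, cnt.contains k = true → (pvRelax d q lst (cnt.insert e.2.1 (e.1 * d + e.2.2 + cnt.getD q 0), e.2.1 :: stack)).1.contains k = true) ∧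
        (pvRelax d q lst (cnt.insert e.2.1 (e.1 * d + e.2.2 + cnt.getD q 0), e.2.1 :: stack)).1.get? q = cnt.get? q := by
      intro hdec
      have hIgetq : (cnt.insert e.2.1 (e.1 * d + e.2.2 + cnt.getD q 0)).getD q 0 = cnt.getD q 0 := by
        rw [PySem.Dict.getD_insert]
        exact if_neg (fun h => hneq h.symm)
      obtain ⟨c1, c2, c3, c4, c5, c6, c7⟩ :=
        ih (cnt.insert e.2.1 (e.1 * d + e.2.2 + cnt.getD q 0)) (e.2.1 :: stack) hne'
      rw [hIgetq] at c1 c5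
      refine ⟨?_, ?_, ?_, ?_, ?_, ?_, ?_⟩
      · intro k
        rcases c1 k with hL | ⟨hS, e', he', hk, hv⟩
        · rw [PySem.Dict.get?_insert] at hL
          by_cases hke : k = e.2.1
          · refine Or.inr ⟨c4 k (by rw [hke]; simp), e, by simp, hke, ?_⟩
            rw [hL, if_pos hke]
          · rw [if_neg hke] at hL
            exact Or.inl hL
        · exact Or.inr ⟨hS, e', List.mem_cons_of_mem _ he', hk, hv⟩
      · intro k v w hv hw
        by_cases hke : k = e.2.1
        · have hIk : (cnt.insert e.2.1 (e.1 * d + e.2.2 + cnt.getD q 0)).get? k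
              = some (e.1 * d + e.2.2 + cnt.getD q 0) := by
            rw [PySem.Dict.get?_insert, if_pos hke]
          have hle := c2 k _ w hIk hw
          exact le_trans hle (hdec v (hke ▸ hv))
        · have hIk : (cnt.insert e.2.1 (e.1 * d + e.2.2 + cnt.getD q 0)).get? k = some v := by
            rw [PySem.Dict.get?_insert, if_neg hke]; exact hv
          exact c2 k v w hIk hw
      · intro s hs
        rcases c3 s hs with hs' | ⟨hcs, e', he', hse⟩
        · rcases List.mem_cons.1 hs' with hse | hs''
          · exact Or.inr ⟨c6 s (by rw [hse, PySem.Dict.contains_insert]; simp), e, by simp, hse⟩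
          · exact Or.inl hs''
        · exact Or.inr ⟨hcs, e', List.mem_cons_of_mem _ he', hse⟩
      · intro s hs
        exact c4 s (List.mem_cons_of_mem _ hs)
      · intro e' he'
        rcases List.mem_cons.1 he' with rfl | he''
        · have hcont : (pvRelax d q lst (cnt.insert e'.2.1 (e'.1 * d + e'.2.2 + cnt.getD q 0), e'.2.1 :: stack)).1.contains e'.2.1 = true :=
            c6 e'.2.1 (by rw [PySem.Dict.contains_insert]; simp)
          refine ⟨hcont, ?_⟩
          have hsome : ((pvRelax d q lst (cnt.insert e'.2.1 (e'.1 * d + e'.2.2 + cnt.getD q 0), e'.2.1 :: stack)).1.get? e'.2.1).isSome = true := by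
            rw [← PySem.Dict.contains_eq_isSome_get?]; exact hcont
          obtain ⟨w, hw⟩ := Option.isSome_iff_exists.1 hsome
          have hIk : (cnt.insert e'.2.1 (e'.1 * d + e'.2.2 + cnt.getD q 0)).get? e'.2.1
              = some (e'.1 * d + e'.2.2 + cnt.getD q 0) := by
            rw [PySem.Dict.get?_insert, if_pos rfl]
          have hle := c2 e'.2.1 _ w hIk hw
          rw [PySem.Dict.getD_eq_get?_getD, hw]
          exact hle
        · exact c5 e' he''
      · intro k hk
        exact c6 k (by rw [PySem.Dict.contains_insert, hk]; simp)
      · rw [c7, PySem.Dict.get?_insert, if_neg (fun h => hneq h.symm)]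
    rcases hg : cnt.get? e.2.1 with _ | old
    · have hstep : pvRelaxStep d q (cnt, stack) e
          = (cnt.insert e.2.1 (e.1 * d + e.2.2 + cnt.getD q 0), e.2.1 :: stack) := by
        unfold pvRelaxStep
        rw [hg]
      rw [hunf, hstep]
      exact key (fun v hv => by rw [hg] at hv; cases hv)
    · by_cases himp : e.1 * d + e.2.2 + cnt.getD q 0 < old
      · have hstep : pvRelaxStep d q (cnt, stack) e
            = (cnt.insert e.2.1 (e.1 * d + e.2.2 + cnt.getD q 0), e.2.1 :: stack) := by
          unfold pvRelaxStep
          rw [hg]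
          exact if_pos himp
        rw [hunf, hstep]
        exact key (fun v hv => by rw [hg] at hv; cases hv; omega)
      · have hstep : pvRelaxStep d q (cnt, stack) e = (cnt, stack) := by
          unfold pvRelaxStep
          rw [hg]
          exact if_neg himp
        rw [hunf, hstep]
        obtain ⟨c1, c2, c3, c4, c5, c6, c7⟩ := ih cnt stack hne'
        refine ⟨?_, c2, ?_, c4, ?_, c6, c7⟩
        · intro k
          rcases c1 k with hL | ⟨hS, e', he', hk, hv⟩
          · exact Or.inl hL
          · exact Or.inr ⟨hS, e', List.mem_cons_of_mem _ he', hk, hv⟩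
        · intro s hs
          rcases c3 s hs with hs' | ⟨hcs, e', he', hse⟩
          · exact Or.inl hs'
          · exact Or.inr ⟨hcs, e', List.mem_cons_of_mem _ he', hse⟩
        · intro e' he'
          rcases List.mem_cons.1 he' with rfl | he''
          · have hcont : cnt.contains e'.2.1 = true := by
              rw [PySem.Dict.contains_eq_isSome_get?, hg]; rfl
            refine ⟨c6 e'.2.1 hcont, ?_⟩
            have hcont' := c6 e'.2.1 hcont
            have hsome : ((pvRelax d q lst (cnt, stack)).1.get? e'.2.1).isSome = true := by
              rw [← PySem.Dict.contains_eq_isSome_get?]; exact hcont'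
            obtain ⟨w, hw⟩ := Option.isSome_iff_exists.1 hsome
            have hle := c2 e'.2.1 old w hg hw
            rw [PySem.Dict.getD_eq_get?_getD, hw]
            simp only [Option.getD_some]
            omega
          · exact c5 e' he''

-- once everything ≥ 2 is settled and some division cost exists, 1 has been recorded
lemma pv_reach1 (times : List Int) (d : Int) (cnt : PySem.Dict Int Int)
    (h3 : ∀ k, cnt.contains k = true → 2 ≤ k → pvSettled times d cnt k)
    (ht : times ≠ []) :
    ∀ k, cnt.contains k = true → 2 ≤ k → cnt.contains 1 = true := by
  suffices H : ∀ (n : Nat) (k : Int), k.toNat = n → cnt.contains k = true → 2 ≤ k →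
      cnt.contains 1 = true by
    exact fun k hc hk => H k.toNat k rfl hc hk
  intro n
  induction n using Nat.strong_induction_on with
  | _ n ih =>
  intro k hkn hc hk
  subst hkn
  obtain ⟨t, ts, rfl⟩ : ∃ t ts, times = t :: ts := by
    cases times with
    | nil => exact absurd rfl ht
    | cons t ts => exact ⟨t, ts, rfl⟩
  have he0 : ((PySem.Int.mod k 2, PySem.Int.floordiv k 2, t) : Int × Int × Int)
      ∈ pvEdgesZ k ([2,3,5].zip (t :: ts)) := by
    simp [pvEdgesZ, List.zip]
  have hset := h3 k hc hk
  have hch := (hset.2 _ he0).1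
  have hfd : 1 ≤ PySem.Int.floordiv k 2 ∧ PySem.Int.floordiv k 2 < k := by
    have h1 := (PySem.Int.le_floordiv_iff_mul_le (a := k) (b := 2) (q := 1) (by norm_num)).2 (by omega)
    have h2 := (pv_div_shrink k 2 hk (by norm_num)).2.1
    exact ⟨h1, h2⟩
  by_cases hone : PySem.Int.floordiv k 2 ≤ 1
  · have : PySem.Int.floordiv k 2 = 1 := by omega
    rwa [this] at hch
  · exact ih (PySem.Int.floordiv k 2).toNat (by omega) _ rfl hch (by omega)

lemma pvVal_le_base (times : List Int) (d : Int) (cnt : PySem.Dict Int Int) (stack : List Int) :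
    pvVal times d cnt stack ≤ cnt.getD 0 0 := pvMinOf_le_base _ _

lemma pvVal_le_one (times : List Int) (d : Int) (cnt : PySem.Dict Int Int) (stack : List Int)
    (h : cnt.contains 1 = true) : pvVal times d cnt stack ≤ cnt.getD 1 0 + d :=
  pvMinOf_le_mem _ _ _ (by rw [h]; simp)

lemma pvVal_le_stack (times : List Int) (d : Int) (cnt : PySem.Dict Int Int) (stack : List Int)
    (s : Int) (h : s ∈ stack) :
    pvVal times d cnt stack ≤ cnt.getD s 0 + pvGG times d s :=
  pvMinOf_le_mem _ _ _ (List.mem_append_right _ (List.mem_map.2 ⟨s, h, rfl⟩))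

lemma le_pvVal (times : List Int) (d : Int) (cnt : PySem.Dict Int Int) (stack : List Int)
    (c : Int) (hb : c ≤ cnt.getD 0 0)
    (h1 : cnt.contains 1 = true → c ≤ cnt.getD 1 0 + d)
    (hs : ∀ s ∈ stack, c ≤ cnt.getD s 0 + pvGG times d s) :
    c ≤ pvVal times d cnt stack := by
  refine le_pvMinOf c _ _ hb ?_
  intro t ht
  rcases List.mem_append.1 ht with ht1 | ht2
  · rcases hc1 : cnt.contains 1 with _ | _
    · rw [hc1] at ht1; cases ht1
    · rw [hc1] at ht1
      rcases List.mem_cons.1 ht1 with rfl | hfalse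
      · exact h1 hc1
      · cases hfalse
  · obtain ⟨s, hsmem, rfl⟩ := List.mem_map.1 ht2
    exact hs s hsmem

-- one processing step of a q ≥ 2 preserves the invariant and the state value
lemma pv_step (times : List Int) (d q : Int) (cnt : PySem.Dict Int Int) (rest : List Int)
    (hq : 2 ≤ q) (hInv : pvInv times d cnt (q :: rest)) :
    pvInv times d
      (pvRelax d q (pvEdgesZ q ([2,3,5].zip times))
        (cnt.insert 0 (min (cnt.getD 0 0) (q * d + cnt.getD q 0)), rest)).1
      (pvRelax d q (pvEdgesZ q ([2,3,5].zip times))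
        (cnt.insert 0 (min (cnt.getD 0 0) (q * d + cnt.getD q 0)), rest)).2 ∧
    pvVal times d
      (pvRelax d q (pvEdgesZ q ([2,3,5].zip times))
        (cnt.insert 0 (min (cnt.getD 0 0) (q * d + cnt.getD q 0)), rest)).1
      (pvRelax d q (pvEdgesZ q ([2,3,5].zip times))
        (cnt.insert 0 (min (cnt.getD 0 0) (q * d + cnt.getD q 0)), rest)).2
      = pvVal times d cnt (q :: rest) := by
  obtain ⟨h0, hstk, h3, hH1⟩ := hInv
  have hedge : ∀ e ∈ pvEdgesZ q ([2,3,5].zip times), 0 ≤ e.2.1 ∧ e.2.1 < q :=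
    pv_edges_mem q _ hq (pv_zip_fst times)
  have hneL : ∀ e ∈ pvEdgesZ q ([2,3,5].zip times), e.2.1 ≠ q := by
    intro e he
    have := hedge e he
    omega
  set cntI := cnt.insert 0 (min (cnt.getD 0 0) (q * d + cnt.getD q 0)) with hcntI
  obtain ⟨c1, c2, c3, c4, c5, c6, c7⟩ :=
    pv_relax_spec d q (pvEdgesZ q ([2,3,5].zip times)) cntI rest hneL
  set C := (pvRelax d q (pvEdgesZ q ([2,3,5].zip times)) (cntI, rest)).1 with hCdef
  set S := (pvRelax d q (pvEdgesZ q ([2,3,5].zip times)) (cntI, rest)).2 with hSdef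
  have hgetD : ∀ (D : PySem.Dict Int Int) (k w : Int), D.get? k = some w → D.getD k 0 = w := by
    intro D k w h
    rw [PySem.Dict.getD_eq_get?_getD, h]
    rfl
  have hcontSome : ∀ (D : PySem.Dict Int Int) (k : Int), D.contains k = true →
      ∃ w, D.get? k = some w := by
    intro D k h
    exact Option.isSome_iff_exists.1 (by rw [← PySem.Dict.contains_eq_isSome_get?]; exact h)
  have hsomeCont : ∀ (D : PySem.Dict Int Int) (k w : Int), D.get? k = some w →
      D.contains k = true := by
    intro D k w h
    rw [PySem.Dict.contains_eq_isSome_get?, h]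
    rfl
  have hq0 : cntI.getD q 0 = cnt.getD q 0 := by
    rw [hcntI, PySem.Dict.getD_insert]
    exact if_neg (by omega)
  rw [hq0] at c1 c5
  have hgI0 : cntI.get? 0 = some (min (cnt.getD 0 0) (q * d + cnt.getD q 0)) := by
    rw [hcntI, PySem.Dict.get?_insert, if_pos rfl]
  have hgI : ∀ k : Int, k ≠ 0 → cntI.get? k = cnt.get? k := by
    intro k hk
    rw [hcntI, PySem.Dict.get?_insert, if_neg hk]
  have hcontI : ∀ k, cnt.contains k = true → cntI.contains k = true := by
    intro k hk
    rw [hcntI, PySem.Dict.contains_insert, hk]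
    simp
  have hcont0I : cntI.contains 0 = true := by
    rw [hcntI]
    exact PySem.Dict.contains_insert_self _ _ _
  have hCq : C.get? q = cnt.get? q := by rw [c7, hgI q (by omega)]
  have hCqD : C.getD q 0 = cnt.getD q 0 := by
    rw [PySem.Dict.getD_eq_get?_getD, hCq, ← PySem.Dict.getD_eq_get?_getD]
  have hCcont0 : C.contains 0 = true := c6 0 hcont0I
  have hC0le : C.getD 0 0 ≤ min (cnt.getD 0 0) (q * d + cnt.getD q 0) := by
    obtain ⟨w, hw⟩ := hcontSome C 0 hCcont0
    rw [hgetD C 0 w hw]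
    exact c2 0 _ w hgI0 hw
  have hCdec : ∀ k : Int, k ≠ 0 → cnt.contains k = true → C.getD k 0 ≤ cnt.getD k 0 := by
    intro k hk hck
    obtain ⟨u, hu⟩ := hcontSome cnt k hck
    have hIu : cntI.get? k = some u := by rw [hgI k hk]; exact hu
    obtain ⟨w, hw⟩ := hcontSome C k (c6 k (hcontI k hck))
    rw [hgetD C k w hw, hgetD cnt k u hu]
    exact c2 k u w hIu hw
  have hG0 : pvGG times d 0 = 0 := by rw [pvGG_low times d 0 (by norm_num)]; ring
  have hG1 : pvGG times d 1 = d := by rw [pvGG_low times d 1 (by norm_num)]; ring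
  have hInew : pvInv times d C S := by
    refine ⟨hCcont0, ?_, ?_, ?_⟩
    · intro s hs
      rcases c3 s hs with hsr | ⟨hcs, e, he, rfl⟩
      · have := hstk s (by simp [hsr])
        exact ⟨this.1, c6 s (hcontI s this.2)⟩
      · exact ⟨(hedge e he).1, hcs⟩
    · intro k hck hk2 hkS
      by_cases hkq : k = q
      · subst hkq
        refine ⟨?_, ?_⟩
        · have h1 := le_trans hC0le (min_le_right _ _)
          rw [hCqD]
          exact h1
        · intro e he
          exact ⟨(c5 e he).1, by rw [hCqD]; exact (c5 e he).2⟩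
      · rcases c1 k with hL | ⟨hkS', _⟩
        · have hIk : C.get? k = cnt.get? k := by rw [hL, hgI k (by omega)]
          obtain ⟨w, hw⟩ := hcontSome C k hck
          have hcntk : cnt.get? k = some w := by rw [← hIk]; exact hw
          have hckOld : cnt.contains k = true := hsomeCont cnt k w hcntk
          have hnotstk : k ∉ q :: rest := by
            intro hmem
            rcases List.mem_cons.1 hmem with h' | h'
            · exact hkq h'
            · exact hkS (c4 k h')
          have hsetOld := h3 k hckOld hk2 hnotstk
          have hCkD : C.getD k 0 = cnt.getD k 0 := by
            rw [hgetD C k w hw, hgetD cnt k w hcntk]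
          refine ⟨?_, ?_⟩
          · rw [hCkD]
            exact le_trans (le_trans hC0le (min_le_left _ _)) hsetOld.1
          · intro e he
            have hold := hsetOld.2 e he
            refine ⟨c6 e.2.1 (hcontI e.2.1 hold.1), ?_⟩
            rw [hCkD]
            by_cases he0 : e.2.1 = 0
            · rw [he0]
              calc C.getD 0 0 ≤ cnt.getD 0 0 := le_trans hC0le (min_le_left _ _)
                _ ≤ e.1 * d + e.2.2 + cnt.getD k 0 := by
                    have h := hold.2
                    rwa [he0] at h
            · calc C.getD e.2.1 0 ≤ cnt.getD e.2.1 0 := hCdec e.2.1 he0 hold.1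
                _ ≤ _ := hold.2
        · exact absurd hkS' hkS
    · rcases hH1 with hc1 | ⟨ht, k, hck, hk2⟩
      · exact Or.inl (c6 1 (hcontI 1 hc1))
      · exact Or.inr ⟨ht, k, c6 k (hcontI k hck), hk2⟩
  have TGold := pv_term_ge times d cnt (q :: rest) h3
  have TGnew := pv_term_ge times d C S hInew.2.2.1
  have hGq_le : pvGG times d q ≤ q * d := pvGG_le_base times d q
  have hGedge : ∀ e ∈ pvEdgesZ q ([2,3,5].zip times),
      pvGG times d q ≤ e.1 * d + e.2.2 + pvGG times d e.2.1 := by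
    intro e he
    rw [pvGG_edges times d q hq]
    exact pvMinOf_le_mem _ _ _ (List.mem_map.2 ⟨e, he, rfl⟩)
  have hvalOld_q : pvVal times d cnt (q :: rest) ≤ cnt.getD q 0 + pvGG times d q :=
    pvVal_le_stack times d cnt (q :: rest) q (by simp)
  have hvalOld_v0 : pvVal times d cnt (q :: rest)
      ≤ min (cnt.getD 0 0) (q * d + cnt.getD q 0) := by
    refine le_min (pvVal_le_base _ _ _ _) ?_
    have := hGq_le
    omega
  have hdir1base : pvVal times d cnt (q :: rest) ≤ C.getD 0 0 := by
    rcases c1 0 with hL | ⟨_, e, he, hk, hkv⟩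
    · rw [hgetD C 0 _ (hL.trans hgI0)]
      exact hvalOld_v0
    · rw [hgetD C 0 _ hkv]
      have h1 := hGedge e he
      have h2 : pvGG times d e.2.1 = 0 := by rw [← hk]; exact hG0
      omega
  have dir1 : pvVal times d cnt (q :: rest) ≤ pvVal times d C S := by
    refine le_pvVal times d C S _ hdir1base ?_ ?_
    · intro hc1new
      rcases c1 1 with hL | ⟨_, e, he, hk, hkv⟩
      · obtain ⟨w, hw⟩ := hcontSome C 1 hc1new
        have hwold : cnt.get? 1 = some w := by
          rw [← hgI 1 (by norm_num), ← hL]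
          exact hw
        have hcold : cnt.contains 1 = true := hsomeCont cnt 1 w hwold
        rw [hgetD C 1 w hw, ← hgetD cnt 1 w hwold]
        exact pvVal_le_one times d cnt (q :: rest) hcold
      · rw [hgetD C 1 _ hkv]
        have h1 := hGedge e he
        have h2 : pvGG times d e.2.1 = d := by rw [← hk]; exact hG1
        omega
    · intro s hs
      rcases c1 s with hL | ⟨_, e, he, hk, hkv⟩
      · by_cases hs0 : s = 0
        · rw [hs0, hG0]
          simpa using hdir1base
        · have hIk : C.get? s = cnt.get? s := by rw [hL, hgI s hs0]
          obtain ⟨w, hw⟩ := hcontSome C s (hInew.2.1 s hs).2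
          have hwold : cnt.get? s = some w := by rw [← hIk]; exact hw
          rw [hgetD C s w hw, ← hgetD cnt s w hwold]
          exact TGold s (hInew.2.1 s hs).1 (hsomeCont cnt s w hwold)
      · rw [hgetD C s _ hkv]
        have h1 := hGedge e he
        have h2 : pvGG times d s = pvGG times d e.2.1 := by rw [hk]
        omega
  have dir2 : pvVal times d C S ≤ pvVal times d cnt (q :: rest) := by
    refine le_pvVal times d cnt (q :: rest) _ ?_ ?_ ?_
    · exact le_trans (pvVal_le_base _ _ _ _) (le_trans hC0le (min_le_left _ _))
    · intro hc1old
      have hc1new : C.contains 1 = true := c6 1 (hcontI 1 hc1old)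
      have h1 := pvVal_le_one times d C S hc1new
      have h2 := hCdec 1 (by norm_num) hc1old
      omega
    · intro s hs
      rcases List.mem_cons.1 hs with rfl | hsr
      · rcases pvMinOf_cases (s * d)
            ((pvEdgesZ s ([2,3,5].zip times)).map
              (fun e => e.1 * d + e.2.2 + pvGG times d e.2.1)) with hcase | hcase <;>
          rw [← pvGG_edges times d s hq] at hcase
        · have h1 := le_trans (pvVal_le_base times d C S) (le_trans hC0le (min_le_right _ _))
          omega
        · obtain ⟨e, he, heq⟩ := List.mem_map.1 hcase
          have h1 := TGnew e.2.1 (hedge e he).1 (c5 e he).1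
          have h2 := (c5 e he).2
          omega
      · have hsS : s ∈ S := c4 s hsr
        have h1 := pvVal_le_stack times d C S s hsS
        by_cases hs0 : s = 0
        · rw [hs0] at h1 ⊢
          rw [hG0] at h1 ⊢
          have := le_trans hC0le (min_le_left _ _)
          omega
        · have h2 := hCdec s hs0 (hstk s (by simp [hsr])).2
          omega
  exact ⟨hInew, le_antisymm dir2 dir1⟩

lemma pv_loop_val (times : List Int) (d : Int) :
    ∀ (N : Nat) (stack : List Int) (cnt : PySem.Dict Int Int), pvMu stack ≤ N →
      pvInv times d cnt stack →
      pvLoop times d cnt stack = pvVal times d cnt stack := by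
  intro N
  induction N using Nat.strong_induction_on with
  | _ N ih =>
  intro stack cnt hmu hInv
  obtain ⟨h0, hstk, h3, hH1⟩ := hInv
  cases stack with
  | nil =>
    have hc1 : cnt.contains 1 = true := by
      rcases hH1 with hc1 | ⟨ht, k, hck, hk2⟩
      · exact hc1
      · exact pv_reach1 times d cnt (fun k' hc' h2' => h3 k' hc' h2' (List.not_mem_nil)) ht
          k hck hk2
    rw [pvLoop]
    unfold pvVal
    rw [hc1]
    show min (cnt.getD 1 0 + d) (cnt.getD 0 0)
      = pvMinOf (cnt.getD 0 0) ([cnt.getD 1 0 + d] ++ [].map _)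
    show _ = min (cnt.getD 0 0) (cnt.getD 1 0 + d)
    exact min_comm _ _
  | cons q rest =>
    have hq0 : 0 ≤ q := (hstk q (by simp)).1
    have hmupos : 1 ≤ 7 ^ q.toNat := Nat.one_le_pow _ _ (by norm_num)
    by_cases hq1 : q ≤ 1
    · rw [pvLoop]
      rw [dif_pos hq1]
      have hrest : pvLoop times d cnt rest = pvVal times d cnt rest := by
        refine ih (pvMu rest) ?_ rest cnt (le_refl _) ⟨h0, fun s hs => hstk s (by simp [hs]), ?_, ?_⟩
        · rw [pvMu_cons] at hmu; omega
        · intro k hck hk2 hkr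
          refine h3 k hck hk2 ?_
          intro hmem
          rcases List.mem_cons.1 hmem with rfl | h'
          · omega
          · exact hkr h'
        · rcases hH1 with hc1 | h'
          · exact Or.inl hc1
          · exact Or.inr h'
      rw [hrest]
      have hG0 : pvGG times d 0 = 0 := by rw [pvGG_low times d 0 (by norm_num)]; ring
      have hG1 : pvGG times d 1 = d := by rw [pvGG_low times d 1 (by norm_num)]; ring
      have hqcase : q = 0 ∨ q = 1 := by omega
      refine le_antisymm ?_ ?_
      · refine le_pvVal times d cnt (q :: rest) _ (pvVal_le_base _ _ _ _) ?_ ?_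
        · exact fun h => pvVal_le_one times d cnt rest h
        · intro s hs
          rcases List.mem_cons.1 hs with rfl | hsr
          · rcases hqcase with rfl | rfl
            · rw [hG0]
              simpa using pvVal_le_base times d cnt rest
            · rw [hG1]
              exact pvVal_le_one times d cnt rest (hstk 1 (by simp)).2
          · exact pvVal_le_stack times d cnt rest s hsr
      · refine le_pvVal times d cnt rest _ (pvVal_le_base _ _ _ _) ?_ ?_
        · exact fun h => pvVal_le_one times d cnt (q :: rest) h
        · intro s hs
          exact pvVal_le_stack times d cnt (q :: rest) s (by simp [hs])
    · rw [pvLoop]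
      rw [dif_neg hq1]
      have hq2 : 2 ≤ q := by omega
      have hstep := pv_step times d q cnt rest hq2 ⟨h0, hstk, h3, hH1⟩
      have hmu' := pv_mu_step times d q
        (cnt.insert 0 (min (cnt.getD 0 0) (q * d + cnt.getD q 0))) rest hq1
      have hrec := ih (pvMu (pvRelax d q (pvEdgesZ q ([2,3,5].zip times))
          (cnt.insert 0 (min (cnt.getD 0 0) (q * d + cnt.getD q 0)), rest)).2)
        (by omega)
        (pvRelax d q (pvEdgesZ q ([2,3,5].zip times))
          (cnt.insert 0 (min (cnt.getD 0 0) (q * d + cnt.getD q 0)), rest)).2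
        (pvRelax d q (pvEdgesZ q ([2,3,5].zip times))
          (cnt.insert 0 (min (cnt.getD 0 0) (q * d + cnt.getD q 0)), rest)).1
        (le_refl _) hstep.1
      rw [hrec]
      exact hstep.2

lemma pv_init_val (times : List Int) (d n : Int) (hn : 1 ≤ n)
    (ht : n = 1 ∨ times ≠ []) :
    pvLoop times d ((PySem.Dict.empty.insert n 0).insert 0 (n * d)) [n]
      = pvGG times d n := by
  have hcont0 : ((PySem.Dict.empty.insert n 0).insert 0 (n * d)).contains 0 = true :=
    PySem.Dict.contains_insert_self _ _ _
  have hcontn : ((PySem.Dict.empty.insert n 0).insert 0 (n * d)).contains n = true := by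
    rw [PySem.Dict.contains_insert, PySem.Dict.contains_insert_self]
    simp
  have hgd0 : ((PySem.Dict.empty.insert n 0).insert 0 (n * d)).getD 0 0 = n * d := by
    rw [PySem.Dict.getD_insert, if_pos rfl]
  have hgdn : ((PySem.Dict.empty.insert n 0).insert 0 (n * d)).getD n 0 = 0 := by
    rw [PySem.Dict.getD_insert, if_neg (by omega), PySem.Dict.getD_insert, if_pos rfl]
  have hconly : ∀ k, ((PySem.Dict.empty.insert n 0).insert 0 (n * d)).contains k = true →
      k = 0 ∨ k = n := by
    intro k hk
    rw [PySem.Dict.contains_insert, PySem.Dict.contains_insert,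
      PySem.Dict.contains_empty] at hk
    simp at hk
    tauto
  have hInv : pvInv times d ((PySem.Dict.empty.insert n 0).insert 0 (n * d)) [n] := by
    refine ⟨hcont0, ?_, ?_, ?_⟩
    · intro s hs
      rcases List.mem_cons.1 hs with rfl | h
      · exact ⟨by omega, hcontn⟩
      · cases h
    · intro k hck hk2 hkn
      rcases hconly k hck with rfl | rfl
      · omega
      · exact absurd (List.mem_singleton.2 rfl) hkn
    · rcases ht with rfl | ht
      · exact Or.inl hcontn
      · by_cases hn1 : n = 1
        · exact Or.inl (hn1 ▸ hcontn)
        · exact Or.inr ⟨ht, n, hcontn, by omega⟩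
  rw [pv_loop_val times d (pvMu [n]) [n] _ (le_refl _) hInv]
  by_cases hn1 : n = 1
  · subst hn1
    have hcont1 : ((PySem.Dict.empty.insert (1:Int) 0).insert 0 (1 * d)).contains 1 = true :=
      hcontn
    unfold pvVal
    rw [hcont1]
    have hG1 : pvGG times d 1 = d := by rw [pvGG_low times d 1 (by norm_num)]; ring
    show pvMinOf _ ([_] ++ [_]) = _
    dsimp only
    simp [pvMinOf]
    rw [hG1, show ((PySem.Dict.empty.insert (1:Int) 0).insert 0 d).getD 1 0 = 0 from by
      rw [PySem.Dict.getD_insert, if_neg (by norm_num), PySem.Dict.getD_insert]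
      exact if_pos rfl]
    simp
  · have hn2 : 2 ≤ n := by omega
    have hcont1 : ((PySem.Dict.empty.insert n 0).insert 0 (n * d)).contains 1 = false := by
      rw [PySem.Dict.contains_insert, PySem.Dict.contains_insert, PySem.Dict.contains_empty]
      simp
      omega
    unfold pvVal
    rw [hcont1]
    show pvMinOf _ ([] ++ [_]) = _
    dsimp only
    rw [hgd0, hgdn]
    show min (n * d) (0 + pvGG times d n) = pvGG times d n
    rw [zero_add]
    exact min_eq_right (pvGG_le_base times d n)


-- ===== VERDICT (by name: the statement is the Claim_ definition above) =====
theorem solve_spec : Claim_equal_solve := by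
  intro LIST _ hpre
  obtain ⟨hlen, hn1, hcase⟩ := hpre
  unfold Spec_solve solve solve_alt
  have htlen : ((LIST.drop 1).dropLast).length = LIST.length - 2 := by
    rw [List.length_dropLast, List.length_drop]
    omega
  have ht : LIST.headD 0 = 1 ∨ (LIST.drop 1).dropLast ≠ [] := by
    rcases hcase with h | h
    · exact Or.inl h
    · refine Or.inr ?_
      intro hnil
      rw [hnil] at htlen
      simp at htlen
      omega
  have hB : (pvGM ([2,3,5].zip ((LIST.drop 1).dropLast)) (LIST.getLastD 0)
      (LIST.headD 0).toNat PySem.Dict.empty (LIST.headD 0)).2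
      = pvGG ((LIST.drop 1).dropLast) (LIST.getLastD 0) (LIST.headD 0) :=
    (pvGM_correct _ _ (pv_zip_fst _) (LIST.headD 0).toNat (LIST.headD 0) PySem.Dict.empty
      (le_refl _) (fun k v h => by rw [PySem.Dict.get?_empty] at h; cases h)).1
  have hA := pv_init_val ((LIST.drop 1).dropLast) (LIST.getLastD 0) (LIST.headD 0) hn1 ht
  exact hA.trans hB.symm
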